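-- pv_equiv track=rewrite | github.com/Srinivas-Raghav-VC/copy-retrieve-compose | Draft_Results/paper2_fidelity_calibrated/multiscale_suite/analysis/aggregate_results.py | _lane_counts
-- ===== SOURCE A (Python) =====
-- from collections import Counter, defaultdict
-- from typing import Any
--
-- def _lane_counts(manifests: list[dict[str, Any]]) -> dict[str, dict[str, int]]:
--     grouped: dict[str, Counter] = defaultdict(Counter)
--     for manifest in manifests:
--         lane = str(manifest.get("lane", "unknown"))
--         status = str(manifest.get("status", "unknown"))
--         grouped[lane][status] += 1
--     return {
--         lane: dict(sorted(counter.items())) for lane, counter in sorted(grouped.items())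
--     }
-- ===== SOURCE B (Python) =====
-- from itertools import groupby
--
-- def _lane_counts(manifests: list[dict[str, any]]) -> dict[str, dict[str, int]]:
--     pairs = sorted(
--         (str(m.get("lane", "unknown")), str(m.get("status", "unknown")))
--         for m in manifests
--     )
--     result = {}
--     for lane, grp in groupby(pairs, key=lambda p: p[0]):
--         result[lane] = {
--             status: len(list(g)) for status, g in groupby(grp, key=lambda p: p[1])
--         }
--     return result
-- ===== Notes on version B (the rewrite author's own statement) =====
-- stated objective: alternative
-- what changed: B replaces A's dict-of-Counters accumulation followed by two sorted() passes with a flat list of (lane, status) tuples sorted once lexicographically and then walked with itertools.groupby (outer on lane, inner on status), so the nested dict is emitted in already-sorted order with no counting dictionaries.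
import Mathlib
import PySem

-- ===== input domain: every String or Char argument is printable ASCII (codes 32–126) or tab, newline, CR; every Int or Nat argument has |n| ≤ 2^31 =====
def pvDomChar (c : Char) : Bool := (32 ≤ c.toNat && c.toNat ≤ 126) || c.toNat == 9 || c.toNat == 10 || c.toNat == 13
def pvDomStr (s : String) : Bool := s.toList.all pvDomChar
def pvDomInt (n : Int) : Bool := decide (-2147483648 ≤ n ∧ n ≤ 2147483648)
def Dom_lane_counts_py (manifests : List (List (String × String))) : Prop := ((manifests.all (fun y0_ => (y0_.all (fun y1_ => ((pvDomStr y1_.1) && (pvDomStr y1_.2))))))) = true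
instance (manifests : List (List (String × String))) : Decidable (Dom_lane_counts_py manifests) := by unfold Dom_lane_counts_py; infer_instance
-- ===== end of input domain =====

-- B builds one flat sorted (lane, status) list and walks its consecutive runs (groupby style)
-- instead of A's dict-of-Counters accumulation plus two sorted() passes; same return value.

-- shared helper: Python's manifest.get(key, default) — first match in the association list
def pvGet (m : List (String × String)) (k dflt : String) : String :=
  (PySem.Dict.mk m).getD k dflt

-- ===== PORT A =====
-- 'grouped[lane][status] += 1' on a defaultdict(Counter) = fetch-or-empty inner dict, bump
-- status, write back (first write appends the lane; later writes keep its position).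
-- Python sorts the (key, value) item tuples; keys are distinct, so comparing by the key
-- alone is the same comparison.
def lane_counts_py (manifests : List (List (String × String))) : List (String × List (String × Int)) :=
  let grouped : PySem.Dict String (PySem.Dict String Int) :=
    manifests.foldl
      (fun g manifest =>
        let lane := pvGet manifest "lane" "unknown"
        let status := pvGet manifest "status" "unknown"
        g.insert lane ((g.getD lane PySem.Dict.empty).modify status 0 (· + 1)))
      PySem.Dict.empty
  (PySem.List.sorted grouped.items (fun p => p.1) false).map
    (fun p => (p.1, PySem.List.sorted p.2.items (fun q => q.1) false))

-- ===== PORT B =====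
-- inner groupby step: merge one status into the run list built from the rest of the
-- (sorted) statuses — consecutive equal statuses collapse to (status, run length)
def lcPush (s : String) : List (String × Int) → List (String × Int)
  | [] => [(s, 1)]
  | (t, n) :: more => if s = t then (t, n + 1) :: more else (s, 1) :: (t, n) :: more

def lcStatusRuns : List String → List (String × Int)
  | [] => []
  | s :: rest => lcPush s (lcStatusRuns rest)

-- outer groupby step: consecutive pairs with the same lane collapse to (lane, statuses)
def lcPushLane (l : String) (s : String) : List (String × List String) → List (String × List String)
  | [] => [(l, [s])]
  | (l', ss) :: more => if l = l' then (l, s :: ss) :: more else (l, [s]) :: (l', ss) :: more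

def lcLaneRuns : List (String × String) → List (String × List String)
  | [] => []
  | (l, s) :: rest => lcPushLane l s (lcLaneRuns rest)

def lane_counts_py_alt (manifests : List (List (String × String))) : List (String × List (String × Int)) :=
  let pairs := manifests.map (fun m => (pvGet m "lane" "unknown", pvGet m "status" "unknown"))
  let sortedPairs := PySem.List.sorted2 pairs (fun p => p.1) (fun p => p.2) false
  (lcLaneRuns sortedPairs).map (fun g => (g.1, lcStatusRuns g.2))

-- ===== PRECONDITION & SPEC =====
def Spec_lane_counts_py (manifests : List (List (String × String))) (out : List (String × List (String × Int))) : Prop := out = lane_counts_py_alt manifests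
instance (manifests : List (List (String × String))) (out : List (String × List (String × Int))) : Decidable (Spec_lane_counts_py manifests out) := by unfold Spec_lane_counts_py; infer_instance

-- ===== CLAIM (what is proved, stated in full; the proofs are below) =====
def Claim_equal_lane_counts_py : Prop := ∀ (manifests : List (List (String × String))), Dom_lane_counts_py manifests → Spec_lane_counts_py manifests (lane_counts_py manifests)

-- ===== LEMMAS AND PROOFS =====

-- inserting a mapped element into a mapped list commutes with the map when the
-- comparator only looks through the map
theorem lc_insertBy_map {α β : Type} (g : α → β) (bef : β → β → Bool) (bef' : α → α → Bool)
    (hb : ∀ a b, bef (g a) (g b) = bef' a b) (x : α) (acc : List α) :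
    PySem.List.insertBy bef (g x) (acc.map g) = (PySem.List.insertBy bef' x acc).map g := by
  induction acc with
  | nil => simp [PySem.List.insertBy]
  | cons y ys ih => simp [PySem.List.insertBy, hb, ih]; split <;> simp

-- sorting a mapped list, when the key reads only the mapped part, is the map of the sort
theorem lc_sorted_map {α β κ : Type} [LinearOrder κ] (g : α → β) (key : β → κ) (xs : List α) :
    PySem.List.sorted (xs.map g) key false = (PySem.List.sorted xs (fun a => key (g a)) false).map g := by
  rw [PySem.List.sorted_eq_foldl_insertBy, PySem.List.sorted_eq_foldl_insertBy, List.foldl_map]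
  suffices h : ∀ (acc : List α),
      xs.foldl (fun acc x => PySem.List.insertBy (fun a b => decide (key a < key b)) (g x) acc) (acc.map g)
      = (xs.foldl (fun acc x => PySem.List.insertBy (fun a b => decide (key (g a) < key (g b))) x acc) acc).map g by
    simpa using h []
  induction xs with
  | nil => intro acc; simp
  | cons x xs ih =>
    intro acc
    simp only [List.foldl_cons]
    rw [lc_insertBy_map g _ _ (fun a b => rfl), ih]
-- groupby step: merge one element into the run list built from the rest

-- A's grouping fold, looked up at one lane, is the counting fold of that lane's statuses
theorem lc_getD_foldM (ms : List (List (String × String))) (l : String)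
    (g : PySem.Dict String (PySem.Dict String Int)) :
    (ms.foldl (fun g manifest =>
        g.insert (pvGet manifest "lane" "unknown")
          ((g.getD (pvGet manifest "lane" "unknown") PySem.Dict.empty).modify (pvGet manifest "status" "unknown") 0 (· + 1))) g).getD l PySem.Dict.empty
    = (((ms.map (fun m => (pvGet m "lane" "unknown", pvGet m "status" "unknown"))).filter (fun p => p.1 == l)).map (·.2)).foldl
        (fun d s => d.modify s 0 (· + 1)) (g.getD l PySem.Dict.empty) := by
  induction ms generalizing g with
  | nil => simp
  | cons m ms ih =>
    simp only [List.foldl_cons, List.map_cons]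
    by_cases hl : pvGet m "lane" "unknown" = l
    · simp [hl, ih]
    · have hb : (pvGet m "lane" "unknown" == l) = false := by simpa using hl
      simp [hb, ih, PySem.Dict.getD_insert, Ne.symm hl]

-- B's inner runs on a ≤-sorted status list: the distinct statuses with their counts
theorem lc_statusRuns_sorted (ss : List String) (h : ss.Pairwise (· ≤ ·)) :
    lcStatusRuns ss = (PySem.Set.ofList ss).map (fun s => (s, (ss.count s : Int))) := by
  induction ss with
  | nil => simp [lcStatusRuns]
  | cons s rest ih =>
    have hrest : rest.Pairwise (· ≤ ·) := h.of_cons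
    have hle : ∀ x ∈ rest, s ≤ x := fun x hx => List.rel_of_pairwise_cons h hx
    rw [PySem.Set.ofList_cons]
    cases rest with
    | nil => simp [lcStatusRuns, lcPush, PySem.Set.discard]
    | cons r rest' =>
      have ihr := ih hrest
      rw [PySem.Set.ofList_cons] at ihr
      rw [show lcStatusRuns (s :: r :: rest') = lcPush s (lcStatusRuns (r :: rest')) from rfl, ihr]
      simp only [List.map_cons, lcPush]
      by_cases hsr : s = r
      · subst hsr
        rw [PySem.Set.ofList_cons]
        have hd : PySem.Set.discard (s :: PySem.Set.discard (PySem.Set.ofList rest') s) s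
            = PySem.Set.discard (PySem.Set.ofList rest') s := by
          simp [PySem.Set.discard, List.filter_filter]
        rw [hd]
        simp only [if_true]
        congr 1
        · simp
        · apply List.map_congr_left
          intro x hx
          have hxs : x ≠ s := by
            have := List.of_mem_filter (p := fun y => !y == s) hx
            simpa using this
          simp [Ne.symm hxs]
      · simp only [if_neg hsr]
        have hnotmem : s ∉ (r :: rest') := by
          intro hm
          have h1 : s ≤ r := hle r (by simp)
          have h2 : r ≤ s := by
            rcases List.mem_cons.mp hm with he | hm'
            · exact le_of_eq he.symm
            · exact List.rel_of_pairwise_cons hrest hm'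
          exact hsr (le_antisymm h1 h2)
        rw [PySem.Set.ofList_cons]
        have hd : PySem.Set.discard (r :: PySem.Set.discard (PySem.Set.ofList rest') r) s
            = r :: PySem.Set.discard (PySem.Set.ofList rest') r := by
          have hmem : ∀ x ∈ PySem.Set.ofList (r :: rest'), x ≠ s := by
            intro x hx he
            exact hnotmem (he ▸ (PySem.Set.mem_ofList _ _).mp hx)
          rw [PySem.Set.ofList_cons] at hmem
          simp only [PySem.Set.discard]
          rw [List.filter_eq_self]
          intro x hx
          simpa using (hmem x hx)
        rw [hd]
        simp only [List.map_cons]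
        congr 1
        · simp [List.count_eq_zero_of_not_mem hnotmem]
        congr 1
        · simp [hsr]
        · apply List.map_congr_left
          intro x hx
          have hxmem : x ∈ (r :: rest') := by
            have h2 := List.mem_of_mem_filter hx
            exact List.mem_cons_of_mem r ((PySem.Set.mem_ofList _ _).mp h2)
          have hxs : x ≠ s := fun he => hnotmem (he ▸ hxmem)
          simp [Ne.symm hxs]

-- B's outer runs on a lane-sorted pair list: the distinct lanes with their status lists
theorem lc_laneRuns_sorted (qs : List (String × String)) (h : qs.Pairwise (fun a b => a.1 ≤ b.1)) :
    lcLaneRuns qs = (PySem.Set.ofList (qs.map (·.1))).map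
      (fun l => (l, (qs.filter (fun p => p.1 == l)).map (·.2))) := by
  induction qs with
  | nil => simp [lcLaneRuns]
  | cons p rest ih =>
    obtain ⟨l, s⟩ := p
    have hrest := h.of_cons
    have hle : ∀ x ∈ rest, l ≤ x.1 := fun x hx => List.rel_of_pairwise_cons h hx
    simp only [List.map_cons]
    rw [PySem.Set.ofList_cons]
    cases rest with
    | nil => simp [lcLaneRuns, lcPushLane, PySem.Set.discard]
    | cons q rest' =>
      have ihr := ih hrest
      simp only [List.map_cons] at ihr
      rw [PySem.Set.ofList_cons] at ihr
      rw [show lcLaneRuns ((l, s) :: q :: rest') = lcPushLane l s (lcLaneRuns (q :: rest')) from rfl, ihr]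
      simp only [List.map_cons, lcPushLane]
      by_cases hlq : l = q.1
      · rw [if_pos hlq]
        rw [PySem.Set.ofList_cons]
        rw [show PySem.Set.discard (q.1 :: PySem.Set.discard (PySem.Set.ofList (rest'.map (·.1))) q.1) l
            = PySem.Set.discard (PySem.Set.ofList (rest'.map (·.1))) q.1 from by
          subst hlq; simp [PySem.Set.discard, List.filter_filter]]
        congr 1
        · subst hlq
          simp
        · apply List.map_congr_left
          intro x hx
          have hxl : x ≠ l := by
            have := List.of_mem_filter (p := fun y => !y == q.1) hx
            subst hlq; simpa using this
          simp [Ne.symm hxl]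
      · rw [if_neg hlq]
        have hnotmem : l ∉ (q :: rest').map (·.1) := by
          intro hm
          rcases List.mem_map.mp hm with ⟨y, hy, hyl⟩
          have h1 : l ≤ y.1 := hle y hy
          have h2 : y.1 ≤ l := le_of_eq hyl
          rcases List.mem_cons.mp hy with he | hy'
          · exact hlq ((hyl ▸ congrArg Prod.fst he).symm).symm
          · have h3 : q.1 ≤ y.1 := List.rel_of_pairwise_cons hrest hy'
            have h4 : l ≤ q.1 := hle q (by simp)
            exact hlq (le_antisymm h4 (hyl ▸ h3))
        have hq1 : l ≠ q.1 := hlq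
        rw [PySem.Set.ofList_cons]
        rw [show PySem.Set.discard (q.1 :: PySem.Set.discard (PySem.Set.ofList (rest'.map (·.1))) q.1) l
            = q.1 :: PySem.Set.discard (PySem.Set.ofList (rest'.map (·.1))) q.1 from by
          have hmem : ∀ x ∈ PySem.Set.ofList ((q :: rest').map (·.1)), x ≠ l := by
            intro x hx he
            exact hnotmem (he ▸ (PySem.Set.mem_ofList _ _).mp hx)
          simp only [List.map_cons] at hmem
          rw [PySem.Set.ofList_cons] at hmem
          simp only [PySem.Set.discard]
          rw [List.filter_eq_self]
          intro x hx
          simpa using (hmem x hx)]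
        simp only [List.map_cons]
        congr 1
        · have : l ∉ ((q :: rest').map (·.1)) := hnotmem
          have hf : (q :: rest').filter (fun p => p.1 == l) = [] := by
            rw [List.filter_eq_nil_iff]
            intro p hp he
            exact hnotmem (List.mem_map.mpr ⟨p, hp, by simpa using he⟩)
          simp [hf]
        congr 1
        · simp [List.filter_cons, if_neg hlq]
        · apply List.map_congr_left
          intro x hx
          have hxmem : x ∈ (q :: rest').map (·.1) := by
            have h2 := List.mem_of_mem_filter hx
            exact List.mem_cons_of_mem q.1 ((PySem.Set.mem_ofList _ _).mp h2)
          have hxl : x ≠ l := fun he => hnotmem (he ▸ hxmem)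
          simp [Ne.symm hxl]

-- Set.ofList keeps any pairwise relation (head :: filtered tail shape)
theorem lc_pairwise_ofList {α : Type} [BEq α] [LawfulBEq α] {R : α → α → Prop}
    (xs : List α) (h : xs.Pairwise R) : (PySem.Set.ofList xs).Pairwise R := by
  induction xs with
  | nil => simp
  | cons x xs ih =>
    rw [PySem.Set.ofList_cons]
    refine List.Pairwise.cons ?_ ?_
    · intro y hy
      have : y ∈ xs := (PySem.Set.mem_ofList _ _).mp (List.mem_of_mem_filter hy)
      exact List.rel_of_pairwise_cons h this
    · exact List.Pairwise.sublist List.filter_sublist (ih h.of_cons)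

-- sorted2 by (fst, snd) is the single-key sort under the lexicographic linear order
theorem lc_sorted2_map_toLex (ps : List (String × String)) :
    (PySem.List.sorted2 ps (fun p => p.1) (fun p => p.2) false).map (fun p => (toLex p : Lex (String × String)))
    = PySem.List.sorted (ps.map (fun p => (toLex p : Lex (String × String)))) (fun x => x) false := by
  rw [PySem.List.sorted_eq_foldl_insertBy, List.foldl_map]
  show (List.foldl (fun acc x => PySem.List.insertBy _ x acc) [] ps).map _ = _
  suffices hgen : ∀ acc : List (String × String),
      (ps.foldl (fun acc x => PySem.List.insertBy
          (fun a b => decide (a.1 < b.1) || (!decide (b.1 < a.1) && decide (a.2 < b.2))) x acc) acc).map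
        (fun p => (toLex p : Lex (String × String)))
      = ps.foldl (fun acc x => PySem.List.insertBy (fun a b => decide (a < b)) (toLex x) acc)
          (acc.map (fun p => (toLex p : Lex (String × String)))) by
    exact (hgen []).symm ▸ rfl
  induction ps with
  | nil => intro acc; rfl
  | cons p ps ih =>
    intro acc
    simp only [List.foldl_cons]
    rw [ih, ← lc_insertBy_map (fun p => (toLex p : Lex (String × String)))
        (fun a b => decide (a < b))
        (fun a b => decide (a.1 < b.1) || (!decide (b.1 < a.1) && decide (a.2 < b.2)))
        ?_]
    intro a b
    rcases lt_trichotomy a.1 b.1 with h1 | h1 | h1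
    · simp [Prod.Lex.lt_iff, h1]
    · simp [Prod.Lex.lt_iff, h1]
    · simp [Prod.Lex.lt_iff, h1, not_lt.mpr (le_of_lt h1)]
      intro he
      exact absurd (he ▸ h1) (lt_irrefl _)

theorem lc_sorted2_pairwise (ps : List (String × String)) :
    (PySem.List.sorted2 ps (fun p => p.1) (fun p => p.2) false).Pairwise
      (fun a b => a.1 < b.1 ∨ (a.1 = b.1 ∧ a.2 ≤ b.2)) := by
  have h := PySem.List.sorted_pairwise (ps.map (fun p => (toLex p : Lex (String × String)))) (fun x => x)
  rw [← lc_sorted2_map_toLex] at h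
  rw [List.pairwise_map] at h
  refine h.imp ?_
  intro a b hab
  simpa [Prod.Lex.le_iff] using hab

-- canonical form shared by both ports: sorted distinct lanes, each with its sorted
-- distinct statuses and their multiplicities in the extracted pair list
theorem lc_A_canon (manifests : List (List (String × String))) :
    lane_counts_py manifests =
      (PySem.List.sorted (PySem.Set.ofList ((manifests.map (fun m => (pvGet m "lane" "unknown", pvGet m "status" "unknown"))).map (·.1))) (fun x => x) false).map
        (fun l => (l,
          (PySem.List.sorted (PySem.Set.ofList (((manifests.map (fun m => (pvGet m "lane" "unknown", pvGet m "status" "unknown"))).filter (fun p => p.1 == l)).map (·.2))) (fun x => x) false).map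
            (fun s => (s, ((((manifests.map (fun m => (pvGet m "lane" "unknown", pvGet m "status" "unknown"))).filter (fun p => p.1 == l)).map (·.2)).count s : Int))))) := by
  simp only [lane_counts_py]
  set ps := manifests.map (fun m => (pvGet m "lane" "unknown", pvGet m "status" "unknown")) with hps
  set grouped : PySem.Dict String (PySem.Dict String Int) := manifests.foldl
      (fun g manifest =>
        g.insert (pvGet manifest "lane" "unknown")
          ((g.getD (pvGet manifest "lane" "unknown") PySem.Dict.empty).modify (pvGet manifest "status" "unknown") 0 (· + 1)))
      PySem.Dict.empty with hg
  have hnd : grouped.keys.Nodup := by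
    rw [hg]
    exact PySem.Dict.nodup_keys_foldl_insert_key manifests (fun m => pvGet m "lane" "unknown") _ _ (by simp)
  have hkeys : grouped.keys = PySem.Set.ofList (ps.map (·.1)) := by
    rw [hg, PySem.Dict.keys_foldl_insert_key]
    rw [hps, List.map_map]
    simp [PySem.Set.update_nil_left]
    rfl
  have hgetD : ∀ l, grouped.getD l PySem.Dict.empty
      = PySem.Dict.counter ((ps.filter (fun p => p.1 == l)).map (·.2)) := by
    intro l
    rw [hg, lc_getD_foldM]
    simp only [PySem.Dict.getD_empty]
    rfl
  rw [PySem.Dict.items_eq_map_keys grouped hnd PySem.Dict.empty, hkeys]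
  rw [List.map_congr_left (l := PySem.Set.ofList (ps.map (·.1)))
      (f := fun k => (k, grouped.getD k PySem.Dict.empty))
      (g := fun k => (k, PySem.Dict.counter ((ps.filter (fun p => p.1 == k)).map (·.2))))
      (fun k _ => by simp only [hgetD k])]
  rw [lc_sorted_map (fun l => (l, PySem.Dict.counter ((ps.filter (fun p => p.1 == l)).map (·.2)))) (fun p => p.1)]
  rw [List.map_map]
  apply List.map_congr_left
  intro l _
  simp only [Function.comp]
  rw [PySem.Dict.items_counter]
  rw [lc_sorted_map (fun k => (k, (((ps.filter (fun p => p.1 == l)).map (·.2)).count k : Int))) (fun q => q.1)]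

theorem lc_B_canon (manifests : List (List (String × String))) :
    lane_counts_py_alt manifests =
      (PySem.List.sorted (PySem.Set.ofList ((manifests.map (fun m => (pvGet m "lane" "unknown", pvGet m "status" "unknown"))).map (·.1))) (fun x => x) false).map
        (fun l => (l,
          (PySem.List.sorted (PySem.Set.ofList (((manifests.map (fun m => (pvGet m "lane" "unknown", pvGet m "status" "unknown"))).filter (fun p => p.1 == l)).map (·.2))) (fun x => x) false).map
            (fun s => (s, ((((manifests.map (fun m => (pvGet m "lane" "unknown", pvGet m "status" "unknown"))).filter (fun p => p.1 == l)).map (·.2)).count s : Int))))) := by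
  simp only [lane_counts_py_alt]
  set ps := manifests.map (fun m => (pvGet m "lane" "unknown", pvGet m "status" "unknown")) with hps
  set qs := PySem.List.sorted2 ps (fun p => p.1) (fun p => p.2) false with hqs
  have hlex : qs.Pairwise (fun a b => a.1 < b.1 ∨ (a.1 = b.1 ∧ a.2 ≤ b.2)) := lc_sorted2_pairwise ps
  have hperm : qs.Perm ps := PySem.List.sorted2_perm ps _ _ false
  have hfst : qs.Pairwise (fun a b => a.1 ≤ b.1) := by
    refine hlex.imp ?_
    rintro a b (hab | ⟨he, _⟩)
    · exact le_of_lt hab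
    · exact le_of_eq he
  rw [lc_laneRuns_sorted qs hfst, List.map_map]
  have houter : PySem.List.sorted (PySem.Set.ofList (ps.map (·.1))) (fun x => x) false
      = PySem.Set.ofList (qs.map (·.1)) := by
    apply PySem.List.sorted_eq_of_perm_of_pairwise_lt
    · rw [List.perm_ext_iff_of_nodup (PySem.Set.nodup_ofList _) (PySem.Set.nodup_ofList _)]
      intro a
      rw [PySem.Set.mem_ofList, PySem.Set.mem_ofList]
      exact (hperm.map (·.1)).mem_iff
    · have h1 : (qs.map (·.1)).Pairwise (fun a b => a ≤ b) := List.pairwise_map.mpr hfst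
      have h2 := lc_pairwise_ofList (qs.map (·.1)) h1
      have h3 : (PySem.Set.ofList (qs.map (·.1))).Pairwise (· ≠ ·) := PySem.Set.nodup_ofList _
      exact (h2.and h3).imp (fun hab => lt_of_le_of_ne hab.1 hab.2)
  rw [houter]
  apply List.map_congr_left
  intro l hl
  have hfq : (qs.filter (fun p => p.1 == l)).Pairwise (fun a b => a.1 < b.1 ∨ (a.1 = b.1 ∧ a.2 ≤ b.2)) :=
    hlex.filter _
  have hXq : ((qs.filter (fun p => p.1 == l)).map (·.2)).Pairwise (· ≤ ·) := by
    rw [List.pairwise_map]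
    refine List.Pairwise.imp_of_mem ?_ hfq
    intro a b ha hb hab
    have ha1 : a.1 = l := by simpa using (List.mem_filter.mp ha).2
    have hb1 : b.1 = l := by simpa using (List.mem_filter.mp hb).2
    rcases hab with h | ⟨_, h⟩
    · rw [ha1, hb1] at h
      exact absurd h (lt_irrefl l)
    · exact h
  show (l, lcStatusRuns ((qs.filter (fun p => p.1 == l)).map (·.2))) = _
  rw [lc_statusRuns_sorted _ hXq]
  have hpermf : ((qs.filter (fun p => p.1 == l)).map (·.2)).Perm ((ps.filter (fun p => p.1 == l)).map (·.2)) :=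
    (hperm.filter _).map _
  have hinner : PySem.List.sorted (PySem.Set.ofList ((ps.filter (fun p => p.1 == l)).map (·.2))) (fun x => x) false
      = PySem.Set.ofList ((qs.filter (fun p => p.1 == l)).map (·.2)) := by
    apply PySem.List.sorted_eq_of_perm_of_pairwise_lt
    · rw [List.perm_ext_iff_of_nodup (PySem.Set.nodup_ofList _) (PySem.Set.nodup_ofList _)]
      intro a
      rw [PySem.Set.mem_ofList, PySem.Set.mem_ofList]
      exact hpermf.mem_iff
    · have h2 := lc_pairwise_ofList _ hXq
      have h3 : (PySem.Set.ofList ((qs.filter (fun p => p.1 == l)).map (·.2))).Pairwise (· ≠ ·) :=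
        PySem.Set.nodup_ofList _
      exact (h2.and h3).imp (fun hab => lt_of_le_of_ne hab.1 hab.2)
  rw [hinner]
  refine congrArg _ (List.map_congr_left ?_)
  intro s _
  rw [hpermf.count_eq]

-- ===== VERDICT (by name: the statement is the Claim_ definition above) =====
theorem lane_counts_py_spec : Claim_equal_lane_counts_py := by
  intro manifests _
  unfold Spec_lane_counts_py
  rw [lc_A_canon, lc_B_canon]
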